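-- pv_equiv track=rewrite | github.com/pssnyder/v7p3r-chess-engine | src/v7p3r_tactical_detector.py | _calc_anti_diagonal_mask
-- ===== SOURCE A (Python) =====
-- def _calc_anti_diagonal_mask(square: int) -> int:
--     """Calculate anti-diagonal mask for given square"""
--     rank, file = divmod(square, 8)
--     mask = 0
--
--     # Negative diagonal (up-left, down-right)
--     for i in range(8):
--         r, f = rank + i, file - i
--         if 0 <= r < 8 and 0 <= f < 8:
--             mask |= 1 << (r * 8 + f)
--         r, f = rank - i, file + i
--         if 0 <= r < 8 and 0 <= f < 8:
--             mask |= 1 << (r * 8 + f)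
--
--     return mask
-- ===== SOURCE B (Python) =====
-- def _calc_anti_diagonal_mask(square: int) -> int:
--     """Calculate anti-diagonal mask for given square"""
--     rank, file = divmod(square, 8)
--     s = rank + file
--     mask = 0
--     for r in range(8):
--         f = s - r
--         if 0 <= f < 8:
--             mask |= 1 << (r * 8 + f)
--     return mask
-- ===== Notes on version B (the rewrite author's own statement) =====
-- stated objective: simpler
-- what changed: Replaces A's two bidirectional outward walks (16 guarded updates per call) with a single pass over ranks r in range(8), deriving the file from the conserved sum rank+file.
import Mathlib
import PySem

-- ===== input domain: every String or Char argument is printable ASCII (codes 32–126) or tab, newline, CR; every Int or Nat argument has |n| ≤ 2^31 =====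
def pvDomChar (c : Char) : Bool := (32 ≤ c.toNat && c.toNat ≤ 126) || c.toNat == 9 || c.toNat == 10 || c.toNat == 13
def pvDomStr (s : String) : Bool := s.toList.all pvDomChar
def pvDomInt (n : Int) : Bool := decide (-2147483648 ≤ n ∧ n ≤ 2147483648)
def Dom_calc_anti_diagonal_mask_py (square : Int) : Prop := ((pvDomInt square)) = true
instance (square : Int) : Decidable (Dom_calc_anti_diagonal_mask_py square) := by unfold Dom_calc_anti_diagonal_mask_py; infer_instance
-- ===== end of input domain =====

-- B replaces A's two outward diagonal walks by one straight pass over ranks using the conserved sum rank+file (simpler decomposition, same O(1) cost).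

-- ===== PORT A =====
def calc_anti_diagonal_mask_py (square : Int) : Int :=
  let rank := PySem.Int.floordiv square 8
  let file := PySem.Int.mod square 8
  (PySem.List.pyRange 0 8 1).foldl (fun mask i =>
    let mask := if 0 ≤ rank + i ∧ rank + i < 8 ∧ 0 ≤ file - i ∧ file - i < 8
      then Int.lor mask ((1 : Int) <<< ((rank + i) * 8 + (file - i)).toNat) else mask
    if 0 ≤ rank - i ∧ rank - i < 8 ∧ 0 ≤ file + i ∧ file + i < 8
      then Int.lor mask ((1 : Int) <<< ((rank - i) * 8 + (file + i)).toNat) else mask) 0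

-- ===== PORT B =====
def calc_anti_diagonal_mask_py_alt (square : Int) : Int :=
  let rank := PySem.Int.floordiv square 8
  let file := PySem.Int.mod square 8
  let s := rank + file
  (PySem.List.pyRange 0 8 1).foldl (fun mask r =>
    let f := s - r
    if 0 ≤ f ∧ f < 8 then Int.lor mask ((1 : Int) <<< (r * 8 + f).toNat) else mask) 0

-- ===== PRECONDITION & SPEC =====
def Spec_calc_anti_diagonal_mask_py (square : Int) (out : Int) : Prop := out = calc_anti_diagonal_mask_py_alt square
instance (square : Int) (out : Int) : Decidable (Spec_calc_anti_diagonal_mask_py square out) := by unfold Spec_calc_anti_diagonal_mask_py; infer_instance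

-- ===== CLAIM (what is proved, stated in full; the proofs are below) =====
def Claim_equal_calc_anti_diagonal_mask_py : Prop := ∀ (square : Int), Dom_calc_anti_diagonal_mask_py square → Spec_calc_anti_diagonal_mask_py square (calc_anti_diagonal_mask_py square)

-- ===== LEMMAS AND PROOFS =====

-- A fold whose step fixes every element of the list returns its initial value.
theorem pv_foldl_id {α β : Type} (f : α → β → α) (l : List β) (b : α)
    (h : ∀ a x, x ∈ l → f a x = a) : l.foldl f b = b := by
  induction l generalizing b with
  | nil => rfl
  | cons y ys ih =>
    simp only [List.foldl]
    rw [h b y (by simp)]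
    exact ih b (fun a x hx => h a x (by simp [hx]))

-- On squares whose rank lies in [-7,14] (i.e. square ∈ [-56,120)) both masks are checked case by case.
theorem pv_agree_small : ∀ (square : Int), -56 ≤ square → square < 120 →
    calc_anti_diagonal_mask_py square = calc_anti_diagonal_mask_py_alt square := by
  intro square h1 h2
  interval_cases square <;> decide

-- Outside that band every guard is false in both programs, so both masks are 0.
theorem pv_agree_big (square : Int) (h : square < -56 ∨ 120 ≤ square) :
    calc_anti_diagonal_mask_py square = calc_anti_diagonal_mask_py_alt square := by
  have hdm := PySem.Int.floordiv_mul_add_mod square 8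
  have hm0 : 0 ≤ PySem.Int.mod square 8 := by
    rw [PySem.Int.mod_eq_emod_of_pos (by norm_num)]; omega
  have hm8 : PySem.Int.mod square 8 < 8 := by
    rw [PySem.Int.mod_eq_emod_of_pos (by norm_num)]; omega
  simp only [calc_anti_diagonal_mask_py, calc_anti_diagonal_mask_py_alt]
  generalize hq : PySem.Int.floordiv square 8 = q at *
  generalize hmm : PySem.Int.mod square 8 = m at *
  rw [pv_foldl_id, pv_foldl_id]
  all_goals intro a x hx
  all_goals rw [PySem.List.mem_pyRange_one] at hx
  all_goals split_ifs <;> omega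

-- ===== VERDICT (by name: the statement is the Claim_ definition above) =====
theorem calc_anti_diagonal_mask_py_spec : Claim_equal_calc_anti_diagonal_mask_py := by
  intro square _
  unfold Spec_calc_anti_diagonal_mask_py
  by_cases h : -56 ≤ square ∧ square < 120
  · exact pv_agree_small square h.1 h.2
  · exact pv_agree_big square (by omega)
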